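-- pv_equiv track=rewrite | github.com/nsv-format/nsv-python | nsv/util.py | unspill
-- ===== SOURCE A (Python) =====
-- from typing import TypeVar, Iterable, List
--
-- T = TypeVar('T')
--
-- def unspill(seq: Iterable[T], marker: T) -> List[List[T]]:
--     """
--     Recover a dimension by picking up termination markers from
--     the provided sequence.
--     Pure structural operation - does NOT perform unescaping.
--     decode = unescape_seqseq ∘ unspill[String, ''] ∘ unspill[Char, '\n']
--     """
--     seqseq = []
--     row = []
--     for item in seq:
--         if item != marker:
--             row.append(item)
--         else:
--             seqseq.append(row)
--             row = []
--     # Strict: don't append incomplete rows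
--     return seqseq
-- ===== SOURCE B (Python) =====
-- def unspill(seq, marker):
--     """
--     Recover a dimension by picking up termination markers from
--     the provided sequence.
--     Index-first formulation: collect marker positions, then emit slices.
--     """
--     lst = list(seq)
--     positions = [i for i, x in enumerate(lst) if x == marker]
--     out = []
--     start = 0
--     for p in positions:
--         out.append(lst[start:p])
--         start = p + 1
--     return out
-- ===== Notes on version B (the rewrite author's own statement) =====
-- stated objective: alternative
-- what changed: Instead of accumulating items one at a time into a current row, B scans once for the marker positions and then emits one slice per boundary, dropping the tail after the last marker by construction.
import Mathlib
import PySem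

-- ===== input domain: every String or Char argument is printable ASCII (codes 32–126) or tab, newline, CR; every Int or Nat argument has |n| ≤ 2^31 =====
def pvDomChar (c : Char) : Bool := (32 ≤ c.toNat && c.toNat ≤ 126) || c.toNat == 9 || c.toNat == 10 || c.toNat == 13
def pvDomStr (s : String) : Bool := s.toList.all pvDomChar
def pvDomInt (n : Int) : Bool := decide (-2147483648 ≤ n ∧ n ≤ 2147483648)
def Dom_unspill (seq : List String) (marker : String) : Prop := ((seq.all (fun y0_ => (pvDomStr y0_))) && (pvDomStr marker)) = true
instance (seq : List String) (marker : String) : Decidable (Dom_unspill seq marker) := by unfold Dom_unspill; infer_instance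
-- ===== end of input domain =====

-- B replaces A's item-by-item row accumulator with an index-first pass: collect marker positions, then emit one slice per boundary (objective: alternative decomposition).


-- ===== PORT A =====
-- item-by-item loop carrying (seqseq, row)
def unspill (seq : List String) (marker : String) : List (List String) :=
  (seq.foldl
    (fun (st : List (List String) × List String) item =>
      if item ≠ marker then (st.1, st.2 ++ [item]) else (st.1 ++ [st.2], []))
    ([], [])).1

-- ===== PORT B =====
-- index-first: marker positions via enumerate, then one slice per position
def unspill_alt (seq : List String) (marker : String) : List (List String) :=
  let positions : List Int :=
    (PySem.List.enumerate seq 0).filterMap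
      (fun ix => if ix.2 = marker then some ix.1 else none)
  (positions.foldl
    (fun (st : List (List String) × Int) p =>
      (st.1 ++ [PySem.List.slice seq (some st.2) (some p)], p + 1))
    ([], 0)).1

-- ===== PRECONDITION & SPEC =====
def Spec_unspill (seq : List String) (marker : String) (out : List (List String)) : Prop := out = unspill_alt seq marker
instance (seq : List String) (marker : String) (out : List (List String)) : Decidable (Spec_unspill seq marker out) := by unfold Spec_unspill; infer_instance

-- ===== CLAIM (what is proved, stated in full; the proofs are below) =====
def Claim_equal_unspill : Prop := ∀ (seq : List String) (marker : String), Dom_unspill seq marker → Spec_unspill seq marker (unspill seq marker)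

-- ===== LEMMAS AND PROOFS =====

-- reference splitter: the rows A produces, recursively
def pvG (m : String) (row : List String) : List String → List (List String)
  | [] => []
  | x :: xs => if x ≠ m then pvG m (row ++ [x]) xs else row :: pvG m [] xs

-- marker positions, structurally
def pvPos (m : String) : List String → Int → List Int
  | [], _ => []
  | x :: xs, s => if x = m then s :: pvPos m xs (s + 1) else pvPos m xs (s + 1)

theorem pvG_of_not_mem (m : String) (row : List String) (lst : List String)
    (h : m ∉ lst) : pvG m row lst = [] := by
  induction lst generalizing row with
  | nil => rfl
  | cons x xs ih =>
    simp only [List.mem_cons, not_or] at h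
    simp [pvG, Ne.symm h.1, ih _ h.2]

theorem pvG_append_not_mem (m : String) (row pre rest : List String)
    (h : m ∉ pre) : pvG m row (pre ++ rest) = pvG m (row ++ pre) rest := by
  induction pre generalizing row with
  | nil => simp
  | cons x xs ih =>
    simp only [List.mem_cons, not_or] at h
    simp [pvG, Ne.symm h.1, ih _ h.2]

theorem pvPos_of_not_mem (m : String) (lst : List String) (s : Int)
    (h : m ∉ lst) : pvPos m lst s = [] := by
  induction lst generalizing s with
  | nil => rfl
  | cons x xs ih =>
    simp only [List.mem_cons, not_or] at h
    simp only [pvPos, if_neg (Ne.symm h.1)]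
    exact ih _ h.2

theorem pvPos_append (m : String) (pre rest : List String) (s : Int) :
    pvPos m (pre ++ rest) s = pvPos m pre s ++ pvPos m rest (s + pre.length) := by
  induction pre generalizing s with
  | nil => simp [pvPos]
  | cons x xs ih =>
    by_cases hx : x = m <;>
      simp [pvPos, hx, ih] <;> ring_nf
theorem pvPos_eq_filterMap (m : String) (lst : List String) (s : Int) :
    (PySem.List.enumerate lst s).filterMap
      (fun ix => if ix.2 = m then some ix.1 else none) = pvPos m lst s := by
  induction lst generalizing s with
  | nil => rfl
  | cons x xs ih =>
    by_cases hx : x = m <;>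
      simp [PySem.List.enumerate_cons, pvPos, hx, ih]

theorem pvFoldA (m : String) (lst : List String) :
    ∀ acc row,
      (lst.foldl
        (fun (st : List (List String) × List String) item =>
          if item ≠ m then (st.1, st.2 ++ [item]) else (st.1 ++ [st.2], []))
        (acc, row)).1 = acc ++ pvG m row lst := by
  induction lst with
  | nil => simp [pvG]
  | cons x xs ih =>
    intro acc row
    simp only [List.foldl_cons]
    by_cases hx : x = m
    · rw [if_neg (by simp [hx]), ih]
      simp [pvG, hx]
    · rw [if_pos hx, ih]
      simp [pvG, hx]

theorem pvFoldB (seq_m : String) (seq : List String) :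
    ∀ n lst (start : Nat) out, lst.length = n → seq.drop start = lst →
      ((pvPos seq_m lst (start : Int)).foldl
        (fun (st : List (List String) × Int) p =>
          (st.1 ++ [PySem.List.slice seq (some st.2) (some p)], p + 1))
        (out, (start : Int))).1 = out ++ pvG seq_m [] lst := by
  intro n
  induction n using Nat.strong_induction_on with
  | _ n ih =>
    intro lst start out hlen hdrop
    by_cases hm : seq_m ∈ lst
    · have hdecomp : ∃ pre suf, lst = pre ++ seq_m :: suf ∧ seq_m ∉ pre := by
        cases h : PySem.List.index? lst seq_m with
        | none => exact absurd hm ((PySem.List.index?_eq_none_iff lst seq_m).1 h)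
        | some k =>
          obtain ⟨pre, suf, h1, _, h3⟩ := (PySem.List.index?_eq_some_iff lst seq_m k).1 h
          exact ⟨pre, suf, h1, h3⟩
      obtain ⟨pre, suf, rfl, hpre⟩ := hdecomp
      have hpos : pvPos seq_m (pre ++ seq_m :: suf) (start : Int)
          = ((start : Int) + pre.length) :: pvPos seq_m suf ((start : Int) + pre.length + 1) := by
        rw [pvPos_append, pvPos_of_not_mem _ _ _ hpre]
        simp [pvPos]
      have hslice : PySem.List.slice seq (some (start : Int)) (some ((start : Int) + (pre.length : Int))) = pre := by
        rw [PySem.List.slice_natCast_add, hdrop]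
        simp
      have hdrop' : seq.drop (start + pre.length + 1) = suf := by
        have h2 : seq.drop (start + (pre.length + 1)) = (seq.drop start).drop (pre.length + 1) := by
          rw [List.drop_drop]
        rw [show start + pre.length + 1 = start + (pre.length + 1) by ring, h2, hdrop]
        simp
      have hsuflen : suf.length < n := by
        rw [← hlen]; simp; omega
      have hIH := ih suf.length hsuflen suf (start + pre.length + 1) (out ++ [pre]) rfl hdrop'
      have hcast : ((start + pre.length + 1 : Nat) : Int) = (start : Int) + pre.length + 1 := by push_cast; ring
      rw [hcast] at hIH
      rw [hpos]
      simp only [List.foldl_cons, hslice]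
      rw [hIH, pvG_append_not_mem _ _ _ _ hpre]
      simp [pvG]
    · simp [pvPos_of_not_mem _ _ _ hm, pvG_of_not_mem _ _ _ hm]

-- ===== VERDICT (by name: the statement is the Claim_ definition above) =====
theorem unspill_spec : Claim_equal_unspill := by
  intro seq marker _
  unfold Spec_unspill unspill unspill_alt
  rw [pvFoldA, pvPos_eq_filterMap]
  have := pvFoldB marker seq seq.length seq 0 [] rfl (by simp)
  simpa using this.symm
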